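-- pv_equiv track=rewrite | github.com/celestebgriff/cs-sprint-challenge-hash-tables | ex4.py | has_negatives
-- ===== SOURCE A (Python) =====
-- def has_negatives(a):
--     """
--     YOUR CODE HERE
--     """
--     # Your code here
--     # create cache and results list
--     cache = dict()
--     result = []
--
--     # traverse each number in the input array
--     for i in a:
--
--         # adding each number to the cache with a value of 1
--         cache[i] = 1
--
--         # if current number is not zero and it's inverse is already in the cahce:
--         # add current number's absolute value to the result list
--         if i != 0 and -i in cache:
--             result.append(abs(i))
--
--     # return results list
--     return result
-- ===== SOURCE B (Python) =====
-- def has_negatives(a):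
--     # Two passes: map each value to the index of its first occurrence,
--     # then keep x when -x first occurs strictly before x's position.
--     first = {}
--     for idx, x in enumerate(a):
--         first.setdefault(x, idx)
--     n = len(a)
--     return [abs(x) for idx, x in enumerate(a) if x != 0 and first.get(-x, n) < idx]
-- ===== Notes on version B (the rewrite author's own statement) =====
-- stated objective: alternative
-- what changed: Replaces A's single pass with a running dict of seen values by two passes: first build a value-to-first-occurrence-index map with setdefault, then filter by comparing the first occurrence index of -x against the current position.
import Mathlib
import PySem

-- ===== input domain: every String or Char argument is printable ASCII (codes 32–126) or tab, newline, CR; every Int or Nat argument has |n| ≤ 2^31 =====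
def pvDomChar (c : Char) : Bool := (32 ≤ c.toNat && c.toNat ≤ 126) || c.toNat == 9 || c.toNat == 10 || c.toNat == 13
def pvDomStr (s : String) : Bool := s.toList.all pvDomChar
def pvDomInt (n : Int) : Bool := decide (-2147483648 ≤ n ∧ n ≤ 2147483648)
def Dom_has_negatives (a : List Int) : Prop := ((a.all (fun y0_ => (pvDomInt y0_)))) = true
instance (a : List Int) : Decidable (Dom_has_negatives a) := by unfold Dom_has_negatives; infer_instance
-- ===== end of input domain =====

-- B replaces A's one-pass running dict of seen values by two passes: a value→first-occurrence-index map, then a filter comparing that index with the current position (alternative decomposition).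

-- ===== PORT A =====
-- literal port of A: fold over a with state (cache, result)
def has_negatives (a : List Int) : List Int :=
  (a.foldl
    (fun (st : PySem.Dict Int Int × List Int) i =>
      let cache := st.1.insert i 1
      if i ≠ 0 ∧ cache.contains (-i) then (cache, st.2 ++ [|i|]) else (cache, st.2))
    (PySem.Dict.empty, [])).2

-- ===== PORT B =====
-- literal port of B: first-occurrence map via setdefault, then a comprehension over enumerate(a)
def has_negatives_alt (a : List Int) : List Int :=
  let first := (PySem.List.enumerate a 0).foldl
    (fun (d : PySem.Dict Int Int) q => d.setdefault q.2 q.1) PySem.Dict.empty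
  let n := PySem.List.len a
  (PySem.List.enumerate a 0).filterMap
    (fun q => if q.2 ≠ 0 ∧ first.getD (-q.2) n < q.1 then some |q.2| else none)

-- ===== PRECONDITION & SPEC =====
def Spec_has_negatives (a : List Int) (out : List Int) : Prop := out = has_negatives_alt a
instance (a : List Int) (out : List Int) : Decidable (Spec_has_negatives a out) := by unfold Spec_has_negatives; infer_instance

-- ===== CLAIM (what is proved, stated in full; the proofs are below) =====
def Claim_equal_has_negatives : Prop := ∀ (a : List Int), Dom_has_negatives a → Spec_has_negatives a (has_negatives a)

-- ===== LEMMAS AND PROOFS =====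

-- common reference form: recursion carrying the already-seen prefix
def pvAux (seen rest : List Int) : List Int :=
  match rest with
  | [] => []
  | x :: xs => (if x ≠ 0 ∧ -x ∈ seen then [|x|] else []) ++ pvAux (seen ++ [x]) xs

-- A's fold equals pvAux, given that the cache's keys are exactly the seen prefix
lemma pvA_gen : ∀ (rest : List Int) (c : PySem.Dict Int Int) (r p : List Int),
    (∀ k, c.contains k = decide (k ∈ p)) →
    (rest.foldl
      (fun (st : PySem.Dict Int Int × List Int) i =>
        let cache := st.1.insert i 1
        if i ≠ 0 ∧ cache.contains (-i) then (cache, st.2 ++ [|i|]) else (cache, st.2))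
      (c, r)).2 = r ++ pvAux p rest := by
  intro rest
  induction rest with
  | nil => intro c r p _; simp [pvAux]
  | cons x xs ih =>
    intro c r p hinv
    have hinv' : ∀ k, (c.insert x 1).contains k = decide (k ∈ p ++ [x]) := by
      intro k
      rw [PySem.Dict.contains_insert, hinv]
      by_cases hk : k = x <;> simp [hk]
    have hcond : (x ≠ 0 ∧ (c.insert x 1).contains (-x)) ↔ (x ≠ 0 ∧ -x ∈ p) := by
      constructor
      · rintro ⟨hx, hc⟩
        refine ⟨hx, ?_⟩
        rw [PySem.Dict.contains_insert, hinv] at hc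
        have hne : -x ≠ x := by omega
        simpa [hne] using hc
      · rintro ⟨hx, hm⟩
        refine ⟨hx, ?_⟩
        rw [PySem.Dict.contains_insert, hinv]
        simp [hm]
    simp only [List.foldl_cons]
    by_cases h : x ≠ 0 ∧ -x ∈ p
    · rw [if_pos (by simpa [hcond] using h)]
      rw [ih _ _ _ hinv']
      simp [pvAux, h]
    · rw [if_neg (by simpa [hcond] using h)]
      rw [ih _ _ _ hinv']
      simp [pvAux, h]

-- the setdefault fold records, for each key, the index of its FIRST occurrence
lemma pvFold_setdefault_get? (l : List Int) : ∀ (s : Int) (d : PySem.Dict Int Int) (k : Int),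
    ((PySem.List.enumerate l s).foldl
      (fun (d : PySem.Dict Int Int) q => d.setdefault q.2 q.1) d).get? k
    = ((d.get? k).orElse (fun _ => (PySem.List.index? l k).map (fun j => s + (j : Int)))) := by
  induction l with
  | nil =>
    intro s d k
    simp [PySem.List.enumerate_nil, PySem.List.index?_eq_idxOf?, Option.orElse]
    cases d.get? k <;> simp
  | cons x xs ih =>
    intro s d k
    rw [PySem.List.enumerate_cons]
    simp only [List.foldl_cons, ih]
    by_cases hcx : d.contains x = true
    · rw [PySem.Dict.setdefault_of_contains _ _ hcx]
      by_cases hk : k = x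
      · subst hk
        have : (d.get? k).isSome := by rw [← PySem.Dict.contains_eq_isSome_get?]; exact hcx
        obtain ⟨v, hv⟩ := Option.isSome_iff_exists.mp this
        simp [hv, Option.orElse]
      · rw [PySem.List.index?_cons_of_ne xs (show x ≠ k from fun h => hk h.symm)]
        cases hdk : d.get? k <;> cases hix : PySem.List.index? xs k <;>
          · simp_all [Option.orElse]
            try ring
    · rw [PySem.Dict.setdefault_of_not_contains _ _ (by simpa using hcx)]
      by_cases hk : k = x
      · subst hk
        have hdk : d.get? k = none := by
          rw [PySem.Dict.get?_eq_none_iff_contains]; simp_all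
        rw [PySem.List.index?_cons_self]
        simp [PySem.Dict.get?_insert_self, hdk, Option.orElse]
      · rw [PySem.Dict.get?_insert_of_ne _ _ hk,
            PySem.List.index?_cons_of_ne xs (show x ≠ k from fun h => hk h.symm)]
        cases hdk : d.get? k <;> cases hix : PySem.List.index? xs k <;>
          · simp_all [Option.orElse]
            try ring

-- membership in a prefix, through the first-occurrence index
lemma pvMem_take_iff (a : List Int) (k : Int) (m : Nat) :
    k ∈ a.take m ↔ ∃ j, PySem.List.index? a k = some j ∧ j < m := by
  constructor
  · intro hm
    have hka : k ∈ a := List.mem_of_mem_take hm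
    obtain ⟨j, hj⟩ := Option.isSome_iff_exists.mp ((PySem.List.index?_isSome_iff a k).mpr hka)
    refine ⟨j, hj, ?_⟩
    obtain ⟨hjlen, hgj, hmin⟩ := PySem.List.getElem_of_index?_eq_some hj
    obtain ⟨i, hi, hgi⟩ := List.getElem_of_mem hm
    have hilen : i < a.length := lt_of_lt_of_le hi (by simp)
    have him : i < m := lt_of_lt_of_le hi (by simp)
    have hai : a[i] = k := by rw [← hgi]; exact (List.getElem_take).symm
    by_contra hjm
    exact hmin i (lt_of_lt_of_le him (le_of_not_gt hjm)) hai
  · rintro ⟨j, hj, hjm⟩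
    obtain ⟨hjlen, hgj, _⟩ := PySem.List.getElem_of_index?_eq_some hj
    have : (a.take m)[j]'(by simp; omega) = a[j] := List.getElem_take
    rw [← hgj, ← this]
    exact List.getElem_mem _

-- B's filterMap equals pvAux, given the first-occurrence characterization of the dict
lemma pvB_gen (a : List Int) (first : PySem.Dict Int Int) (n : Int)
    (hfirst : ∀ (k : Int) (m : Nat), m ≤ a.length → (first.getD k n < (m : Int) ↔ k ∈ a.take m)) :
    ∀ (rest : List Int) (s : Nat), a.drop s = rest →
    (PySem.List.enumerate rest (s : Int)).filterMap
      (fun q => if q.2 ≠ 0 ∧ first.getD (-q.2) n < q.1 then some |q.2| else none)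
      = pvAux (a.take s) rest := by
  intro rest
  induction rest with
  | nil => intro s _; simp [pvAux, PySem.List.enumerate_nil]
  | cons x xs ih =>
    intro s hdrop
    have hs : s < a.length := by
      by_contra h
      simp [List.drop_eq_nil_of_le (le_of_not_gt h)] at hdrop
    have hget : a[s]? = some x := by
      have h0 : (a.drop s)[0]? = a[s + 0]? := List.getElem?_drop
      simp [hdrop] at h0
      simpa using h0.symm
    have htake : a.take (s + 1) = a.take s ++ [x] := by
      rw [List.take_add_one, hget]; rfl
    have hdrop' : a.drop (s + 1) = xs := by
      have h1 : a.drop (s + 1) = (a.drop s).drop 1 := by rw [List.drop_drop]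
      rw [h1, hdrop]; rfl
    have hrec := ih (s + 1) hdrop'
    have hcast : (s : Int) + 1 = ((s + 1 : Nat) : Int) := by push_cast; ring
    have hcond : first.getD (-x) n < (s : Int) ↔ -x ∈ a.take s :=
      hfirst (-x) s (le_of_lt hs)
    rw [PySem.List.enumerate_cons]
    simp only [List.filterMap_cons, hcast, hrec, pvAux, htake]
    by_cases hx : x ≠ 0 ∧ -x ∈ a.take s
    · rw [if_pos (⟨hx.1, hcond.mpr hx.2⟩ : _ ∧ _)]
      simp [hx]
    · rw [if_neg (by rintro ⟨h1, h2⟩; exact hx ⟨h1, hcond.mp h2⟩)]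
      simp [hx]

-- ===== VERDICT (by name: the statement is the Claim_ definition above) =====
theorem has_negatives_spec : Claim_equal_has_negatives := by
  intro a _
  unfold Spec_has_negatives has_negatives has_negatives_alt
  rw [pvA_gen a PySem.Dict.empty [] [] (fun k => by simp)]
  have hfirst : ∀ (k : Int) (m : Nat), m ≤ a.length →
      (((PySem.List.enumerate a 0).foldl
        (fun (d : PySem.Dict Int Int) q => d.setdefault q.2 q.1) PySem.Dict.empty).getD k
        (PySem.List.len a) < (m : Int) ↔ k ∈ a.take m) := by
    intro k m hm
    rw [PySem.Dict.getD_eq_get?_getD, pvFold_setdefault_get?, PySem.Dict.get?_empty,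
        pvMem_take_iff]
    cases hix : PySem.List.index? a k with
    | none =>
      simp [Option.orElse, PySem.List.len_eq]
      omega
    | some j =>
      simp [Option.orElse]
  have := pvB_gen a _ _ hfirst a 0 (by simp)
  simpa using this.symm
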